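-- pv_equiv track=rewrite | github.com/sampaiopedroh/sla | tabuleiro.py | tabuleiro_xadrez
-- ===== SOURCE A (Python) =====
-- def tabuleiro_xadrez(tamanho):
--     tabuleiro = []
--     for i in range(tamanho):
--         linha = []
--         for j in range(tamanho):
--             if (i + j) % 2 == 0:
--                 linha.append(".")
--             else:
--                 linha.append("x")
--         tabuleiro.append(linha)
--     return tabuleiro
-- ===== SOURCE B (Python) =====
-- def tabuleiro_xadrez(tamanho):
--     # Precompute the two alternating row templates, then select by row parity.
--     row_a = ["." if j % 2 == 0 else "x" for j in range(tamanho)]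
--     row_b = ["x" if j % 2 == 0 else "." for j in range(tamanho)]
--     return [list(row_a) if i % 2 == 0 else list(row_b) for i in range(tamanho)]
-- ===== Notes on version B (the rewrite author's own statement) =====
-- stated objective: simpler
-- what changed: B precomputes the two alternating row templates once and the outer pass just copies the template chosen by row parity, instead of recomputing (i+j)%2 per cell in nested loops.
import Mathlib
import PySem

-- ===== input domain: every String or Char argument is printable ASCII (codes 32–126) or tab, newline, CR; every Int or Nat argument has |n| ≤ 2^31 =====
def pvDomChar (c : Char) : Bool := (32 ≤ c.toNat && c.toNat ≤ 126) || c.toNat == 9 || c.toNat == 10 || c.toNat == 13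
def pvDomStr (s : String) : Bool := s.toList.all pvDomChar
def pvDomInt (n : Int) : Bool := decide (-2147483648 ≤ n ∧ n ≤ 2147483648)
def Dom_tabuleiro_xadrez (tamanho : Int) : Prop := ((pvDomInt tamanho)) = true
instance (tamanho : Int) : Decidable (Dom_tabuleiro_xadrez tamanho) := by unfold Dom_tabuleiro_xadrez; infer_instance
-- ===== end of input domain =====

-- B precomputes the two alternating row templates once and selects by row parity (simpler decomposition).

-- ===== PORT A =====
def tabuleiro_xadrez (tamanho : Int) : List (List String) :=
  (PySem.List.pyRange 0 tamanho 1).foldl (fun tabuleiro i =>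
    tabuleiro ++ [(PySem.List.pyRange 0 tamanho 1).foldl (fun linha j =>
      linha ++ [if PySem.Int.mod (i + j) 2 = 0 then "." else "x"]) []]) []

-- ===== PORT B =====
def tabuleiro_xadrez_alt (tamanho : Int) : List (List String) :=
  let row_a := (PySem.List.pyRange 0 tamanho 1).map (fun j => if PySem.Int.mod j 2 = 0 then "." else "x")
  let row_b := (PySem.List.pyRange 0 tamanho 1).map (fun j => if PySem.Int.mod j 2 = 0 then "x" else ".")
  (PySem.List.pyRange 0 tamanho 1).map (fun i => if PySem.Int.mod i 2 = 0 then row_a else row_b)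

-- ===== PRECONDITION & SPEC =====
def Spec_tabuleiro_xadrez (tamanho : Int) (out : List (List String)) : Prop := out = tabuleiro_xadrez_alt tamanho
instance (tamanho : Int) (out : List (List String)) : Decidable (Spec_tabuleiro_xadrez tamanho out) := by unfold Spec_tabuleiro_xadrez; infer_instance

-- ===== CLAIM (what is proved, stated in full; the proofs are below) =====
def Claim_equal_tabuleiro_xadrez : Prop := ∀ (tamanho : Int), Dom_tabuleiro_xadrez tamanho → Spec_tabuleiro_xadrez tamanho (tabuleiro_xadrez tamanho)

-- ===== LEMMAS AND PROOFS =====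

-- an append-accumulator foldl is a map
theorem pv_foldl_append_map {α β : Type} (f : α → β) (l : List α) (acc : List β) :
    l.foldl (fun a x => a ++ [f x]) acc = acc ++ l.map f := by
  induction l generalizing acc with
  | nil => simp
  | cons x xs ih => simp [List.foldl, ih]

-- ===== VERDICT (by name: the statement is the Claim_ definition above) =====
theorem tabuleiro_xadrez_spec : Claim_equal_tabuleiro_xadrez := by
  intro tamanho _
  show tabuleiro_xadrez tamanho = tabuleiro_xadrez_alt tamanho
  unfold tabuleiro_xadrez tabuleiro_xadrez_alt
  rw [pv_foldl_append_map]
  simp only [List.nil_append]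
  apply List.map_congr_left
  intro i hi
  have hi0 : 0 ≤ i := (PySem.List.mem_pyRange_one.mp hi).1
  rw [pv_foldl_append_map]
  simp only [List.nil_append]
  by_cases h : PySem.Int.mod i 2 = 0 <;> simp only [h, if_false, if_pos] <;>
    · apply List.map_congr_left
      intro j hj
      have hj0 : 0 ≤ j := (PySem.List.mem_pyRange_one.mp hj).1
      rw [PySem.Int.mod_eq_emod_of_pos (by norm_num : (0:Int) < 2)] at h ⊢
      rw [PySem.Int.mod_eq_emod_of_pos (by norm_num : (0:Int) < 2)]
      by_cases hj2 : j % 2 = 0 <;> simp [hj2] <;> [skip; skip] <;> omega
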